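-- pv_equiv track=rewrite | github.com/yukraven/vitg | Sources/Parser.py | splitByMarks
-- ===== SOURCE A (Python) =====
-- def splitByMarks(wordWithMarks):
--     marks = [".", ",", "!", "?"]
--     words = [wordWithMarks]
--     for mark in marks:
--         tempWords = []
--         for word in words:
--             if word.count(mark) > 0:
--                 tempWords += word.split(mark)
--             elif word != "":
--                 tempWords += [word]
--         words = tempWords
--
--     return words
-- ===== SOURCE B (Python) =====
-- def splitByMarks(wordWithMarks):
--     out = []
--     for token in wordWithMarks.replace(",", ".").replace("!", ".").split("."):
--         if token != "":
--             out.extend(token.split("?"))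
--     return out
-- ===== Notes on version B (the rewrite author's own statement) =====
-- stated objective: simpler
-- what changed: B replaces A's four uniform split-or-keep passes over a growing word list by two stages: normalise commas and exclamation marks to periods, split once on periods keeping only non-empty tokens, then extend the output with each token's question-mark split (keeping those empties, exactly as A does).
import Mathlib
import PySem

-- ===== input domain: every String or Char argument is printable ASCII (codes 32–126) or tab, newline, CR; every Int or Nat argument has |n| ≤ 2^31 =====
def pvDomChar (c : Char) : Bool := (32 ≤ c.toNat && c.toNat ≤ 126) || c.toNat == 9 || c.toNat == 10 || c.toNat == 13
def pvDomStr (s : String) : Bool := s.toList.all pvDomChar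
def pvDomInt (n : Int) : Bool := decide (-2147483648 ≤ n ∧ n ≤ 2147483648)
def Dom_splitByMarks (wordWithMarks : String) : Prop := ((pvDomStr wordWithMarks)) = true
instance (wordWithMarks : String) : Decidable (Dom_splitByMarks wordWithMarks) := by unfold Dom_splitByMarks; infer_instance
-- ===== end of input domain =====

-- B computes the same token list in two stages (normalise ','/'!' to '.', split once on '.',
-- then extend with each non-empty token's '?'-split) instead of A's four uniform passes; objective: simpler.

-- shared faithful primitive: Python's w.split(m) for a NON-EMPTY separator m
-- (exactly PySem.Str.split? with the `none` (empty-separator ValueError) case unreachable: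
-- both programs only ever split on the literal one-character strings "." and "?")
def pySplit (w m : String) : List String :=
  (PySem.Chars.splitOn w.toList m.toList).map String.ofList

-- ===== PORT A =====
def splitByMarks (wordWithMarks : String) : List String :=
  ([".", ",", "!", "?"] : List String).foldl
    (fun words mark =>
      words.foldl
        (fun tempWords word =>
          if PySem.Str.count word mark > 0 then tempWords ++ pySplit word mark
          else if word ≠ "" then tempWords ++ [word]
          else tempWords)
        [])
    [wordWithMarks]

-- ===== PORT B =====
def splitByMarks_alt (wordWithMarks : String) : List String :=
  (pySplit (PySem.Str.replace (PySem.Str.replace wordWithMarks "," ".") "!" ".") ".").foldl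
    (fun out token => if token ≠ "" then out ++ pySplit token "?" else out)
    []

-- ===== PRECONDITION & SPEC =====
def Spec_splitByMarks (wordWithMarks : String) (out : List String) : Prop := out = splitByMarks_alt wordWithMarks
instance (wordWithMarks : String) (out : List String) : Decidable (Spec_splitByMarks wordWithMarks out) := by unfold Spec_splitByMarks; infer_instance

-- ===== CLAIM (what is proved, stated in full; the proofs are below) =====
def Claim_equal_splitByMarks : Prop := ∀ (wordWithMarks : String), Dom_splitByMarks wordWithMarks → Spec_splitByMarks wordWithMarks (splitByMarks wordWithMarks)

-- ===== LEMMAS AND PROOFS =====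

-- char-level model of splitting on a single character
def splitC (c : Char) : List Char → List (List Char)
  | [] => [[]]
  | a :: t =>
      if a = c then [] :: splitC c t
      else (a :: (splitC c t).headI) :: (splitC c t).tail

theorem splitC_ne_nil (c : Char) (l : List Char) : splitC c l ≠ [] := by
  cases l with
  | nil => simp [splitC]
  | cons a t => simp only [splitC]; split <;> simp

theorem splitC_headI_tail (c : Char) (l : List Char) :
    (splitC c l).headI :: (splitC c l).tail = splitC c l := by
  cases h : splitC c l with
  | nil => exact absurd h (splitC_ne_nil c l)
  | cons p ps => rfl

-- bridge: PySem's splitOn with a one-character separator is splitC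
theorem splitOn_go_single (c : Char) (fuel : Nat) :
    ∀ (l cur : List Char) (acc : List (List Char)), l.length ≤ fuel →
      PySem.Chars.splitOn.go [c] fuel l cur acc =
        acc.reverse ++ ((cur.reverse ++ (splitC c l).headI) :: (splitC c l).tail) := by
  induction fuel with
  | zero =>
    intro l cur acc h
    have : l = [] := by cases l <;> simp_all
    subst this
    rw [PySem.Chars.splitOn.go] <;> simp [splitC]
  | succ n ih =>
    intro l cur acc h
    cases l with
    | nil => rw [PySem.Chars.splitOn.go] <;> first | simp [splitC] | omega
    | cons a t =>
      rw [PySem.Chars.splitOn.go]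
      have hpre : ([c].isPrefixOf (a :: t)) = (a == c) := by simp [List.isPrefixOf, eq_comm]
      have hdrop : List.drop ([c] : List Char).length (a :: t) = t := rfl
      rw [hpre, hdrop]
      by_cases hac : a = c
      · rw [if_pos (by simp [hac])]
        rw [ih t [] (cur.reverse :: acc) (Nat.le_of_succ_le_succ h)]
        subst hac
        simp [splitC, splitC_headI_tail]
      · rw [if_neg (by simp [hac])]
        rw [ih t (a :: cur) acc (Nat.le_of_succ_le_succ h)]
        simp [splitC, hac, List.append_assoc]

theorem splitOn_single (c : Char) (l : List Char) :
    PySem.Chars.splitOn l [c] = splitC c l := by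
  show PySem.Chars.splitOn.go [c] (l.length + 1) l [] [] = _
  rw [splitOn_go_single c (l.length + 1) l [] [] (Nat.le_succ _)]
  simp [splitC_headI_tail]

-- bridge: PySem's count with a one-character pattern is List.count
theorem count_go_single (c : Char) (fuel : Nat) :
    ∀ (l : List Char) (acc : Nat), l.length ≤ fuel →
      PySem.Chars.count.go [c] fuel l acc = acc + l.count c := by
  induction fuel with
  | zero =>
    intro l acc h
    have : l = [] := by cases l <;> simp_all
    subst this
    rw [PySem.Chars.count.go] <;> simp
  | succ n ih =>
    intro l acc h
    cases l with
    | nil => rw [PySem.Chars.count.go] <;> first | simp | omega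
    | cons a t =>
      rw [PySem.Chars.count.go]
      have hpre : ([c].isPrefixOf (a :: t)) = (a == c) := by simp [List.isPrefixOf, eq_comm]
      have hdrop : List.drop ([c] : List Char).length (a :: t) = t := rfl
      rw [hpre, hdrop]
      by_cases hac : a = c
      · rw [if_pos (by simp [hac])]
        rw [ih t (acc + 1) (Nat.le_of_succ_le_succ h)]
        subst hac
        simp [List.count_cons]
        omega
      · rw [if_neg (by simp [hac])]
        rw [ih t acc (Nat.le_of_succ_le_succ h)]
        simp [List.count_cons]
        exact hac

theorem count_single (c : Char) (l : List Char) :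
    PySem.Chars.count l [c] = l.count c := by
  show (if ([c] : List Char).isEmpty then l.length + 1 else PySem.Chars.count.go [c] l.length l 0) = _
  rw [if_neg (by simp)]
  rw [count_go_single c l.length l 0 (le_refl _)]
  simp

-- bridge: PySem's replace of one char by another is a map
theorem replace_go_single (d c : Char) (fuel : Nat) :
    ∀ (l acc : List Char), l.length ≤ fuel →
      PySem.Chars.replace.go [d] [c] fuel l acc =
        acc.reverse ++ l.map (fun x => if x = d then c else x) := by
  induction fuel with
  | zero =>
    intro l acc h
    have : l = [] := by cases l <;> simp_all
    subst this
    rw [PySem.Chars.replace.go] <;> simp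
  | succ n ih =>
    intro l acc h
    cases l with
    | nil => rw [PySem.Chars.replace.go] <;> first | simp | omega
    | cons a t =>
      rw [PySem.Chars.replace.go]
      have hpre : ([d].isPrefixOf (a :: t)) = (a == d) := by simp [List.isPrefixOf, eq_comm]
      have hdrop : List.drop ([d] : List Char).length (a :: t) = t := rfl
      rw [hpre, hdrop]
      by_cases had : a = d
      · rw [if_pos (by simp [had])]
        rw [show ([c] : List Char).reverse ++ acc = c :: acc from rfl]
        rw [ih t (c :: acc) (Nat.le_of_succ_le_succ h)]
        simp [had]
      · rw [if_neg (by simp [had])]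
        rw [ih t (a :: acc) (Nat.le_of_succ_le_succ h)]
        simp [had]

theorem replace_single (d c : Char) (l : List Char) :
    PySem.Chars.replace l [d] [c] = l.map (fun x => if x = d then c else x) := by
  show (if ([d] : List Char).isEmpty then _ else PySem.Chars.replace.go [d] [c] l.length l []) = _
  rw [if_neg (by simp)]
  rw [replace_go_single d c l.length l [] (le_refl _)]
  simp

-- c ∉ l → splitting changes nothing
theorem splitC_of_not_mem (c : Char) (l : List Char) (h : c ∉ l) : splitC c l = [l] := by
  induction l with
  | nil => rfl
  | cons a t ih =>
    simp only [List.mem_cons, not_or] at h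
    have ha : a ≠ c := Ne.symm h.1
    simp [splitC, ha, ih h.2]

-- KEY: replacing d by c (d ≠ c) then splitting on c = splitting on c then each piece on d
theorem splitC_map_replace (c d : Char) (hcd : c ≠ d) (l : List Char) :
    splitC c (l.map (fun x => if x = d then c else x)) =
      (splitC c l).flatMap (splitC d) := by
  induction l with
  | nil => simp [splitC]
  | cons a t ih =>
    by_cases had : a = d
    · subst had
      have hac : a ≠ c := fun h => hcd h.symm
      simp only [List.map_cons, if_pos rfl, splitC, if_pos rfl, if_neg hac, ih]
      rw [← splitC_headI_tail c t]
      simp only [List.flatMap_cons, splitC, if_pos rfl]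
      simp
    · by_cases hac : a = c
      · subst hac
        simp only [List.map_cons, if_neg had, splitC, if_pos rfl, ih]
        rw [← splitC_headI_tail a t]
        simp only [List.flatMap_cons, splitC]
        simp [splitC]
      · simp only [List.map_cons, if_neg had, splitC, if_neg hac, ih]
        rw [← splitC_headI_tail c t]
        simp only [List.flatMap_cons]
        rw [splitC_headI_tail]
        have h1 : splitC d (a :: (splitC c t).headI) =
            (a :: (splitC d (splitC c t).headI).headI) :: (splitC d (splitC c t).headI).tail := by
          simp [splitC, had]
        rw [h1]
        cases hs : splitC d (splitC c t).headI with
        | nil => exact absurd hs (splitC_ne_nil _ _)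
        | cons p ps => simp

-- char-level one pass of A
def passC (c : Char) (ws : List (List Char)) : List (List Char) :=
  ws.foldl
    (fun temp w =>
      if w.count c > 0 then temp ++ splitC c w
      else if w ≠ [] then temp ++ [w]
      else temp)
    []

def mc (c : Char) (ws : List (List Char)) : List (List Char) := ws.flatMap (splitC c)
def nE (ws : List (List Char)) : List (List Char) := ws.filter (· ≠ [])

theorem passC_step (c : Char) (w : List Char) :
    (if w.count c > 0 then splitC c w else if w ≠ [] then [w] else []) =
      (if w = [] then [] else splitC c w) := by
  by_cases hw : w = []
  · subst hw; simp
  · simp only [if_neg hw, hw, ne_eq, not_false_eq_true, if_true]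
    by_cases hc : w.count c > 0
    · simp [hc]
    · have : c ∉ w := List.count_eq_zero.mp (Nat.eq_zero_of_not_pos hc)
      simp [hc, splitC_of_not_mem c w this]

theorem passC_eq (c : Char) (ws : List (List Char)) :
    passC c ws = ws.flatMap (fun w => if w = [] then [] else splitC c w) := by
  unfold passC
  rw [show (fun (temp : List (List Char)) w =>
      if w.count c > 0 then temp ++ splitC c w
      else if w ≠ [] then temp ++ [w]
      else temp) = (fun temp w => temp ++ (if w = [] then [] else splitC c w)) from ?_]
  · exact PySem.List.foldl_append_eq_flatMap _ ws []
  · funext temp w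
    rw [← passC_step c w]
    by_cases h1 : w.count c > 0
    · simp [h1]
    · by_cases h2 : w = [] <;> simp [h1, h2]

theorem flatMap_if_eq_filter (g : List Char → List (List Char)) (ws : List (List Char)) :
    ws.flatMap (fun w => if w = [] then [] else g w) = (nE ws).flatMap g := by
  induction ws with
  | nil => rfl
  | cons w t ih =>
    by_cases hw : w = [] <;> simp [nE, hw, ih, List.filter_cons] at * <;> simp [hw, ih]

theorem passC_eq_mc (c : Char) (ws : List (List Char)) : passC c ws = mc c (nE ws) := by
  rw [passC_eq, flatMap_if_eq_filter]; rfl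

theorem nE_append (X Y : List (List Char)) : nE (X ++ Y) = nE X ++ nE Y := by
  simp [nE, List.filter_append]

theorem nE_mc_nE (c : Char) (ws : List (List Char)) : nE (mc c (nE ws)) = nE (mc c ws) := by
  induction ws with
  | nil => rfl
  | cons w t ih =>
    by_cases hw : w = []
    · subst hw
      have h1 : nE ([] :: t) = nE t := by simp [nE]
      have h2 : mc c ([] :: t) = [[]] ++ mc c t := by simp [mc, splitC]
      rw [h1, h2, nE_append, ih]
      have h3 : nE [[]] = [] := by simp [nE]
      rw [h3, List.nil_append]
    · have h1 : nE (w :: t) = w :: nE t := by simp [nE, hw]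
      have h2 : mc c (w :: t) = splitC c w ++ mc c t := by simp [mc]
      have h3 : mc c (w :: nE t) = splitC c w ++ mc c (nE t) := by simp [mc]
      rw [h1, h2, h3, nE_append, nE_append, ih]

theorem nE_mc_congr (c : Char) (ws ws' : List (List Char)) (h : nE ws = nE ws') :
    nE (mc c ws) = nE (mc c ws') := by
  rw [← nE_mc_nE c ws, h, nE_mc_nE]

-- char-level master identity
theorem master (L : List Char) :
    passC '?' (passC '!' (passC ',' (passC '.' [L]))) =
      mc '?' (nE (splitC '.' ((L.map (fun x => if x = ',' then '.' else x)).map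
        (fun x => if x = '!' then '.' else x)))) := by
  have e1 : nE (passC '.' [L]) = nE (mc '.' [L]) := by
    rw [passC_eq_mc, nE_mc_nE]
  have e2 : nE (passC ',' (passC '.' [L])) = nE (mc ',' (mc '.' [L])) := by
    rw [passC_eq_mc, nE_mc_nE, nE_mc_congr ',' _ _ e1]
  have e3 : nE (passC '!' (passC ',' (passC '.' [L]))) = nE (mc '!' (mc ',' (mc '.' [L]))) := by
    rw [passC_eq_mc, nE_mc_nE, nE_mc_congr '!' _ _ e2]
  rw [passC_eq_mc '?']
  congr 1
  rw [e3]
  congr 1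
  rw [splitC_map_replace '.' '!' (by decide), splitC_map_replace '.' ',' (by decide)]
  simp [mc]

-- string/char transfer
theorem ofList_eq_empty_iff (l : List Char) : String.ofList l = "" ↔ l = [] := by
  constructor
  · intro h
    have := congrArg String.toList h
    simpa [String.toList_ofList] using this
  · intro h; subst h; rfl

theorem pySplit_ofList (c : Char) (m : String) (hm : m.toList = [c]) (w : List Char) :
    pySplit (String.ofList w) m = (splitC c w).map String.ofList := by
  unfold pySplit
  rw [String.toList_ofList, hm, splitOn_single]

theorem passStr (c : Char) (m : String) (hm : m.toList = [c]) (ws : List (List Char)) :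
    ∀ (acc : List (List Char)),
      (ws.map String.ofList).foldl
        (fun tempWords word =>
          if PySem.Str.count word m > 0 then tempWords ++ pySplit word m
          else if word ≠ "" then tempWords ++ [word]
          else tempWords)
        (acc.map String.ofList) =
      (ws.foldl
        (fun temp w =>
          if w.count c > 0 then temp ++ splitC c w
          else if w ≠ [] then temp ++ [w]
          else temp)
        acc).map String.ofList := by
  induction ws with
  | nil => intro acc; rfl
  | cons w t ih =>
    intro acc
    simp only [List.map_cons, List.foldl_cons]
    have hcount : PySem.Str.count (String.ofList w) m = w.count c := by
      unfold PySem.Str.count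
      rw [String.toList_ofList, hm, count_single]
    rw [hcount]
    by_cases h1 : w.count c > 0
    · rw [if_pos h1, if_pos h1, pySplit_ofList c m hm, ← List.map_append, ih]
    · rw [if_neg h1, if_neg h1]
      by_cases h2 : w = []
      · subst h2
        rw [if_neg (by simp [ofList_eq_empty_iff]), if_neg (by simp), ih]
      · rw [if_pos (by simp [ofList_eq_empty_iff, h2]), if_pos (by simp [h2])]
        rw [show (acc.map String.ofList) ++ [String.ofList w] = (acc ++ [w]).map String.ofList by simp, ih]

theorem passStr0 (c : Char) (m : String) (hm : m.toList = [c]) (ws : List (List Char)) :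
    (ws.map String.ofList).foldl
      (fun tempWords word =>
        if PySem.Str.count word m > 0 then tempWords ++ pySplit word m
        else if word ≠ "" then tempWords ++ [word]
        else tempWords)
      [] = (passC c ws).map String.ofList := by
  have := passStr c m hm ws []
  simpa [passC] using this

theorem portA_char (w : String) :
    splitByMarks w = (passC '?' (passC '!' (passC ',' (passC '.' [w.toList])))).map String.ofList := by
  unfold splitByMarks
  have h0 : ([w] : List String) = ([w.toList] : List (List Char)).map String.ofList := by
    simp [String.ofList_toList]
  rw [h0]
  rw [List.foldl_cons, List.foldl_cons, List.foldl_cons, List.foldl_cons, List.foldl_nil]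
  rw [passStr0 '.' "." rfl [w.toList]]
  rw [passStr0 ',' "," rfl (passC '.' [w.toList])]
  rw [passStr0 '!' "!" rfl (passC ',' (passC '.' [w.toList]))]
  rw [passStr0 '?' "?" rfl (passC '!' (passC ',' (passC '.' [w.toList])))]

theorem bFold (ts : List (List Char)) :
    ∀ (acc : List (List Char)),
      ((ts.map String.ofList).foldl
        (fun out token => if token ≠ "" then out ++ pySplit token "?" else out)
        (acc.map String.ofList)) =
      (ts.foldl (fun out t => if t ≠ [] then out ++ splitC '?' t else out) acc).map String.ofList := by
  induction ts with
  | nil => intro acc; rfl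
  | cons t ts ih =>
    intro acc
    simp only [List.map_cons, List.foldl_cons]
    by_cases h : t = []
    · subst h
      rw [if_neg (by simp [ofList_eq_empty_iff]), if_neg (by simp), ih]
    · rw [if_pos (by simp [ofList_eq_empty_iff, h]), if_pos (by simp [h])]
      rw [pySplit_ofList '?' "?" rfl t, ← List.map_append, ih]

theorem bFold_mc (ts : List (List Char)) :
    ts.foldl (fun out t => if t ≠ [] then out ++ splitC '?' t else out) [] = mc '?' (nE ts) := by
  rw [show (fun (out : List (List Char)) t => if t ≠ [] then out ++ splitC '?' t else out) =
      (fun out t => out ++ (if t = [] then [] else splitC '?' t)) from ?_]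
  · rw [PySem.List.foldl_append_eq_flatMap, flatMap_if_eq_filter]; rfl
  · funext out t
    by_cases h : t = [] <;> simp [h]

theorem portB_char (w : String) :
    splitByMarks_alt w = (mc '?' (nE (splitC '.' ((w.toList.map (fun x => if x = ',' then '.' else x)).map
      (fun x => if x = '!' then '.' else x))))).map String.ofList := by
  unfold splitByMarks_alt
  have hr1 : PySem.Str.replace w "," "." =
      String.ofList (w.toList.map (fun x => if x = ',' then '.' else x)) := by
    unfold PySem.Str.replace
    rw [show ("," : String).toList = [','] from rfl, show ("." : String).toList = ['.'] from rfl,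
      replace_single]
  have hr2 : PySem.Str.replace (PySem.Str.replace w "," ".") "!" "." =
      String.ofList ((w.toList.map (fun x => if x = ',' then '.' else x)).map
        (fun x => if x = '!' then '.' else x)) := by
    rw [hr1]
    unfold PySem.Str.replace
    rw [String.toList_ofList, show ("!" : String).toList = ['!'] from rfl,
      show ("." : String).toList = ['.'] from rfl, replace_single]
  rw [hr2, pySplit_ofList '.' "." rfl]
  have hb := bFold (splitC '.' ((w.toList.map (fun x => if x = ',' then '.' else x)).map
      (fun x => if x = '!' then '.' else x))) []
  simp only [List.map_nil] at hb
  rw [hb, bFold_mc]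

-- ===== VERDICT (by name: the statement is the Claim_ definition above) =====
theorem splitByMarks_spec : Claim_equal_splitByMarks := by
  intro w _
  unfold Spec_splitByMarks
  rw [portA_char, portB_char, master]
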